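-- pv_equiv track=rewrite | github.com/vishal1438/tranzmeoProject | que5.py | movingTotal
-- ===== SOURCE A (Python) =====
-- def movingTotal(n, c):
--     l = range(1, n+1)
--     p = []
--     for i in range(0, n):
--         if i+2==n:
--             break
--         p.append(sum([l[i], l[i+1], l[i+2]]))
--     if c in p:
--         return True
--     else:
--         return False
-- ===== SOURCE B (Python) =====
-- def movingTotal(n, c):
--     # c is a sum of three consecutive integers i+(i+1)+(i+2)=3i+3 with 1<=i<=n-2,
--     # i.e. c in {6, 9, ..., 3*n-3}: an O(1) arithmetic test.
--     return n >= 3 and 6 <= c <= 3 * n - 3 and c % 3 == 0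
-- ===== Notes on version B (the rewrite author's own statement) =====
-- stated objective: faster
-- what changed: Replaced the O(n) loop that builds the list of all consecutive-triple sums and scans it with a closed-form O(1) arithmetic test (6 <= c <= 3n-3 and c divisible by 3); Pre_ excludes n == 1, where A raises IndexError.
import Mathlib
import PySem

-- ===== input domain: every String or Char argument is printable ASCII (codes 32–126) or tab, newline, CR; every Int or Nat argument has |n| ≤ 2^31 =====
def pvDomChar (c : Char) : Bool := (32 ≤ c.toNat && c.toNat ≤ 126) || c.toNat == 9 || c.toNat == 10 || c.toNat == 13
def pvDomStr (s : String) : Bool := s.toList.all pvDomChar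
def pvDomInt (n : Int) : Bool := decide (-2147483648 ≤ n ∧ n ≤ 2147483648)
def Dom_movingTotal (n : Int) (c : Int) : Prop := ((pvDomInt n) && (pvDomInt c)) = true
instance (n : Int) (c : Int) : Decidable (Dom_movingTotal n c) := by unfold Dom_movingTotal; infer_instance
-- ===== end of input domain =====

-- B replaces A's O(n) build-a-list-and-scan loop with an O(1) arithmetic test;
-- return-value equivalence proved on n ≠ 1 (A raises IndexError at n = 1).

-- ===== PORT A =====
-- the loop 'for i in range(0, n): if i+2==n: break; p.append(sum([l[i],l[i+1],l[i+2]]))';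
-- none = IndexError from an out-of-range l[...] (reachable only at n = 1)
def pvLoopA (l : List Int) (n : Int) : List Int → List Int → Option (List Int)
  | [], p => some p
  | i :: rest, p =>
    if i + 2 = n then some p
    else
      match PySem.List.pyGet? l i, PySem.List.pyGet? l (i+1), PySem.List.pyGet? l (i+2) with
      | some a, some b, some c => pvLoopA l n rest (p ++ [a + b + c])
      | _, _, _ => none

def movingTotal (n : Int) (c : Int) : Bool :=
  -- l = range(1, n+1)
  match pvLoopA (PySem.List.pyRange 1 (n+1) 1) n (PySem.List.pyRange 0 n 1) [] with
  | some p => decide (c ∈ p)   -- 'if c in p: return True else: return False'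
  | none => false              -- unreachable under Pre_ (A raises here)

-- ===== PORT B =====
def movingTotal_alt (n : Int) (c : Int) : Bool :=
  decide (3 ≤ n) && (decide (6 ≤ c) && decide (c ≤ 3 * n - 3)) && decide (PySem.Int.mod c 3 = 0)

-- ===== PRECONDITION & SPEC =====
-- A raises IndexError exactly when n = 1 (the loop reads l[2] from a length-1 range); excluded.
def Pre_movingTotal (n : Int) (c : Int) : Prop := n ≠ 1
instance (n : Int) (c : Int) : Decidable (Pre_movingTotal n c) := by unfold Pre_movingTotal; infer_instance
def pvWitness_movingTotal : Int × Int := (5, 9)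

def Spec_movingTotal (n : Int) (c : Int) (out : Bool) : Prop := out = movingTotal_alt n c
instance (n : Int) (c : Int) (out : Bool) : Decidable (Spec_movingTotal n c out) := by unfold Spec_movingTotal; infer_instance

-- ===== CLAIM (what is proved, stated in full; the proofs are below) =====
def Claim_equal_movingTotal : Prop := ∀ (n : Int) (c : Int), Dom_movingTotal n c → Pre_movingTotal n c → Spec_movingTotal n c (movingTotal n c)

-- ===== LEMMAS AND PROOFS =====

-- l[i] for l = range(1, n+1) and 0 ≤ i < n
theorem pvGet_range (n i : Int) (h0 : 0 ≤ i) (h1 : i < n) :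
    PySem.List.pyGet? (PySem.List.pyRange 1 (n+1) 1) i = some (1 + i) := by
  obtain ⟨k, rfl⟩ : ∃ k : ℕ, i = (k : Int) := ⟨i.toNat, by omega⟩
  rw [PySem.List.pyGet?_natCast]
  rw [List.getElem?_eq_getElem (by rw [PySem.List.length_pyRange_one]; omega)]
  rw [PySem.List.getElem_pyRange_one]

-- loop characterisation: starting at index i (with i+2 ≤ n) the loop appends 3k+6 for k ∈ [i, n-2)
theorem pvLoopA_spec (n : Int) :
    ∀ (m : ℕ) (i : Int) (p : List Int), 0 ≤ i → i + 2 ≤ n → (n - 2 - i).toNat = m →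
    pvLoopA (PySem.List.pyRange 1 (n+1) 1) n (PySem.List.pyRange i n 1) p =
      some (p ++ (PySem.List.pyRange i (n-2) 1).map (fun k => 3 * k + 6)) := by
  intro m
  induction m with
  | zero =>
    intro i p h0 h2 hm
    have hin : i + 2 = n := by omega
    rw [PySem.List.pyRange_one_cons (by omega : i < n)]
    rw [PySem.List.pyRange_one_eq_nil (by omega : n - 2 ≤ i)]
    simp [pvLoopA, hin]
  | succ m ih =>
    intro i p h0 h2 hm
    have hlt : i + 2 < n := by omega
    rw [PySem.List.pyRange_one_cons (by omega : i < n)]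
    rw [PySem.List.pyRange_one_cons (by omega : i < n - 2)]
    simp only [pvLoopA, if_neg (by omega : ¬ i + 2 = n)]
    rw [pvGet_range n i h0 (by omega), pvGet_range n (i+1) (by omega) (by omega),
        pvGet_range n (i+2) (by omega) (by omega)]
    simp only [List.map_cons]
    rw [ih (i+1) (p ++ [(1 + i) + (1 + (i+1)) + (1 + (i+2))]) (by omega) (by omega) (by omega)]
    congr 1
    have : (1 + i) + (1 + (i+1)) + (1 + (i+2)) = 3 * i + 6 := by ring
    rw [this]
    simp

theorem pvMovingTotal_eq (n c : Int) (hn : n ≠ 1) :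
    movingTotal n c = movingTotal_alt n c := by
  unfold movingTotal movingTotal_alt
  by_cases h2 : 2 ≤ n
  · rw [show PySem.List.pyRange 0 n 1 = PySem.List.pyRange (0:Int) n 1 from rfl,
        pvLoopA_spec n (n - 2 - 0).toNat 0 [] (by omega) (by omega) rfl]
    simp only [List.nil_append]
    have hmem : (c ∈ (PySem.List.pyRange 0 (n-2) 1).map (fun k => 3 * k + 6)) ↔
        (3 ≤ n ∧ (6 ≤ c ∧ c ≤ 3 * n - 3) ∧ c % 3 = 0) := by
      simp only [List.mem_map, PySem.List.mem_pyRange_one]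
      constructor
      · rintro ⟨k, ⟨hk0, hk1⟩, rfl⟩
        omega
      · rintro ⟨h3, ⟨h6, hub⟩, hmod⟩
        exact ⟨(c - 6) / 3, by omega, by omega⟩
    simp only [hmem]
    rw [PySem.Int.mod_eq_emod_of_pos (by omega : (0:Int) < 3)]
    simp [Bool.and_assoc]
  · -- n ≤ 0 (n = 1 excluded): the loop body never runs, p = []
    have hn0 : n ≤ 0 ∨ n = 2 := by omega
    rcases hn0 with hn0 | rfl
    · rw [PySem.List.pyRange_one_eq_nil (by omega : n ≤ 0)]
      simp only [pvLoopA, List.not_mem_nil, decide_false]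
      have : ¬ (3 ≤ n) := by omega
      simp [this]
    · omega

-- ===== VERDICT (by name: the statement is the Claim_ definition above) =====
theorem movingTotal_spec : Claim_equal_movingTotal := by
  intro n c _ hpre
  exact pvMovingTotal_eq n c hpre
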